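-- pv_equiv track=rewrite | github.com/hardenedlinux/angband | angband/analysis/vuln_analyzer.py | estimate_slab_cache
-- ===== SOURCE A (Python) =====
-- KNOWN_OBJECT_SIZES = {
--     "nft_set_elem": 256,
--     "sk_buff": 256,
--     "msg_msg": 48,      # header only; total allocation depends on data size
--     "pipe_buffer": 40,
--     "struct cred": 192,
--     "struct file": 256,
--     "tty_struct": 736,
--     "seq_operations": 32,
--     "subprocess_info": 96,
--     "timerfd_ctx": 256,
-- }
--
-- def estimate_slab_cache(obj_name: str, obj_size: int = 0) -> str:
--     """Estimate which kmalloc slab cache an object falls into."""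
--     if obj_size == 0:
--         obj_size = KNOWN_OBJECT_SIZES.get(obj_name, 0)
--
--     if obj_size == 0:
--         return "unknown"
--
--     # kmalloc cache sizes: 8, 16, 32, 64, 96, 128, 192, 256, 512, 1024, ...
--     caches = [8, 16, 32, 64, 96, 128, 192, 256, 512, 1024, 2048, 4096, 8192]
--     for cache_size in caches:
--         if obj_size <= cache_size:
--             if cache_size >= 1024:
--                 return f"kmalloc-{cache_size // 1024}k"
--             return f"kmalloc-{cache_size}"
--
--     return "kmalloc-8k"
-- ===== SOURCE B (Python) =====
-- KNOWN_OBJECT_SIZES = {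
--     "nft_set_elem": 256,
--     "sk_buff": 256,
--     "msg_msg": 48,      # header only; total allocation depends on data size
--     "pipe_buffer": 40,
--     "struct cred": 192,
--     "struct file": 256,
--     "tty_struct": 736,
--     "seq_operations": 32,
--     "subprocess_info": 96,
--     "timerfd_ctx": 256,
-- }
--
-- def estimate_slab_cache(obj_name: str, obj_size: int = 0) -> str:
--     """Estimate which kmalloc slab cache an object falls into."""
--     size = obj_size if obj_size != 0 else KNOWN_OBJECT_SIZES.get(obj_name, 0)
--     if size == 0:
--         return "unknown"
--     if size > 8192:
--         return "kmalloc-8k"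
--     # round up to the next power of two, with the 96 and 192 slab exceptions
--     if size <= 8:
--         cache = 8
--     elif 64 < size <= 96:
--         cache = 96
--     elif 128 < size <= 192:
--         cache = 192
--     else:
--         cache = 1 << (size - 1).bit_length()
--     if cache >= 1024:
--         return f"kmalloc-{cache // 1024}k"
--     return f"kmalloc-{cache}"
-- ===== Notes on version B (the rewrite author's own statement) =====
-- stated objective: alternative
-- what changed: Replaces A's linear scan over the 13-entry kmalloc size list with a closed-form computation: round the size up to the next power of two via (size-1).bit_length(), with explicit 96/192 slab exceptions and an 8/8192 clamp; no cache list and no scan remain.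
import Mathlib
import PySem

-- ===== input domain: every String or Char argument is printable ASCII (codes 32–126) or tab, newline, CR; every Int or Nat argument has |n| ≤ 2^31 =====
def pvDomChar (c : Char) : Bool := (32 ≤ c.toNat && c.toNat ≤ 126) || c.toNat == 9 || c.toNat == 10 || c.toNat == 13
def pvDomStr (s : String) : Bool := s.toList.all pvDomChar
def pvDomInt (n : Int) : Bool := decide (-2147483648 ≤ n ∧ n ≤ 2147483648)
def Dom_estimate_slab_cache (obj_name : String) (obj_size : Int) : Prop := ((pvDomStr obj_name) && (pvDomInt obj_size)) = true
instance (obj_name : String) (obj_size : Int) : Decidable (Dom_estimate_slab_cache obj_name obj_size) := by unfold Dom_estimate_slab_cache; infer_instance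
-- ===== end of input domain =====

-- B replaces A's linear scan over the cache-size list by a closed-form round-up to the
-- next power of two (bit_length) with the 96/192 slab exceptions; objective: alternative.

-- ===== PORT A =====
def KNOWN_OBJECT_SIZES : PySem.Dict String Int :=
  (((((((((PySem.Dict.empty.insert "nft_set_elem" 256).insert "sk_buff" 256).insert
    "msg_msg" 48).insert "pipe_buffer" 40).insert "struct cred" 192).insert
    "struct file" 256).insert "tty_struct" 736).insert "seq_operations" 32).insert
    "subprocess_info" 96).insert "timerfd_ctx" 256

-- the 'for cache_size in caches' loop of A, returning on the first fitting cache
def scanCaches (obj_size : Int) : List Int → String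
  | [] => "kmalloc-8k"
  | cache_size :: rest =>
    if obj_size ≤ cache_size then
      if cache_size ≥ 1024 then
        "kmalloc-" ++ PySem.Int.toStr (PySem.Int.floordiv cache_size 1024) ++ "k"
      else "kmalloc-" ++ PySem.Int.toStr cache_size
    else scanCaches obj_size rest

def estimate_slab_cache (obj_name : String) (obj_size : Int) : String :=
  let obj_size := if obj_size = 0 then KNOWN_OBJECT_SIZES.getD obj_name 0 else obj_size
  if obj_size = 0 then "unknown"
  else scanCaches obj_size [8, 16, 32, 64, 96, 128, 192, 256, 512, 1024, 2048, 4096, 8192]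

-- ===== PORT B =====
-- Python's int.bit_length on a nonnegative integer
def bitLength (n : Nat) : Nat := if n = 0 then 0 else Nat.log2 n + 1

def estimate_slab_cache_alt (obj_name : String) (obj_size : Int) : String :=
  let size := if obj_size ≠ 0 then obj_size else KNOWN_OBJECT_SIZES.getD obj_name 0
  if size = 0 then "unknown"
  else if size > 8192 then "kmalloc-8k"
  else
    let cache : Int :=
      if size ≤ 8 then 8
      else if 64 < size ∧ size ≤ 96 then 96
      else if 128 < size ∧ size ≤ 192 then 192
      else ((1 <<< bitLength (size - 1).toNat : Nat) : Int)
    if cache ≥ 1024 then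
      "kmalloc-" ++ PySem.Int.toStr (PySem.Int.floordiv cache 1024) ++ "k"
    else "kmalloc-" ++ PySem.Int.toStr cache

-- ===== PRECONDITION & SPEC =====
def Spec_estimate_slab_cache (obj_name : String) (obj_size : Int) (out : String) : Prop := out = estimate_slab_cache_alt obj_name obj_size
instance (obj_name : String) (obj_size : Int) (out : String) : Decidable (Spec_estimate_slab_cache obj_name obj_size out) := by unfold Spec_estimate_slab_cache; infer_instance

-- ===== CLAIM (what is proved, stated in full; the proofs are below) =====
def Claim_equal_estimate_slab_cache : Prop := ∀ (obj_name : String) (obj_size : Int), Dom_estimate_slab_cache obj_name obj_size → Spec_estimate_slab_cache obj_name obj_size (estimate_slab_cache obj_name obj_size)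

-- ===== LEMMAS AND PROOFS =====

theorem bitLength_eq {n k : Nat} (h1 : 2 ^ k ≤ n) (h2 : n < 2 ^ (k + 1)) :
    bitLength n = k + 1 := by
  have hn : n ≠ 0 := by
    have : 0 < 2 ^ k := Nat.pow_pos (by norm_num : 0 < 2)
    omega
  unfold bitLength
  rw [if_neg hn, Nat.log2_eq_log_two, Nat.log_eq_of_pow_le_of_lt_pow h1 h2]

-- A's scan agrees with B's closed form for every size
theorem core_eq (s : Int) :
    scanCaches s [8, 16, 32, 64, 96, 128, 192, 256, 512, 1024, 2048, 4096, 8192] =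
      (if s > 8192 then "kmalloc-8k"
       else
         if (if s ≤ 8 then (8:Int)
           else if 64 < s ∧ s ≤ 96 then 96
           else if 128 < s ∧ s ≤ 192 then 192
           else ((1 <<< bitLength (s - 1).toNat : Nat) : Int)) ≥ 1024 then
           "kmalloc-" ++ PySem.Int.toStr (PySem.Int.floordiv (if s ≤ 8 then (8:Int)
           else if 64 < s ∧ s ≤ 96 then 96
           else if 128 < s ∧ s ≤ 192 then 192
           else ((1 <<< bitLength (s - 1).toNat : Nat) : Int)) 1024) ++ "k"
         else "kmalloc-" ++ PySem.Int.toStr (if s ≤ 8 then (8:Int)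
           else if 64 < s ∧ s ≤ 96 then 96
           else if 128 < s ∧ s ≤ 192 then 192
           else ((1 <<< bitLength (s - 1).toNat : Nat) : Int))) := by
  have H : s ≤ 8 ∨ (8 < s ∧ s ≤ 16) ∨ (16 < s ∧ s ≤ 32) ∨ (32 < s ∧ s ≤ 64) ∨ (64 < s ∧ s ≤ 96) ∨ (96 < s ∧ s ≤ 128) ∨ (128 < s ∧ s ≤ 192) ∨ (192 < s ∧ s ≤ 256) ∨ (256 < s ∧ s ≤ 512) ∨ (512 < s ∧ s ≤ 1024) ∨ (1024 < s ∧ s ≤ 2048) ∨ (2048 < s ∧ s ≤ 4096) ∨ (4096 < s ∧ s ≤ 8192) ∨ s > 8192 := by omega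
  rcases H with h|h|h|h|h|h|h|h|h|h|h|h|h|h
  · -- s ≤ 8
    simp only [scanCaches]
    rw [if_pos (by omega : s ≤ (8:Int)), if_neg (by norm_num : ¬ (8:Int) ≥ 1024),
        if_neg (by omega : ¬ s > (8192:Int)), if_pos (by omega : s ≤ (8:Int)),
        if_neg (by norm_num : ¬ (8:Int) ≥ 1024)]
  · -- 8 < s ≤ 16
    have hb : bitLength (s - 1).toNat = 4 := bitLength_eq (k := 3) (by omega) (by omega)
    have hc : ((1 <<< bitLength (s - 1).toNat : Nat) : Int) = 16 := by rw [hb]; decide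
    simp only [scanCaches, hc]
    rw [if_neg (by omega : ¬ s ≤ (8:Int)),
        if_pos (by omega : s ≤ (16:Int)), if_neg (by norm_num : ¬ (16:Int) ≥ 1024),
        if_neg (by omega : ¬ s > (8192:Int)), if_neg (by omega : ¬ s ≤ (8:Int)),
        if_neg (by omega : ¬ ((64:Int) < s ∧ s ≤ 96)),
        if_neg (by omega : ¬ ((128:Int) < s ∧ s ≤ 192)),
        if_neg (by norm_num : ¬ (16:Int) ≥ 1024)]
  · -- 16 < s ≤ 32
    have hb : bitLength (s - 1).toNat = 5 := bitLength_eq (k := 4) (by omega) (by omega)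
    have hc : ((1 <<< bitLength (s - 1).toNat : Nat) : Int) = 32 := by rw [hb]; decide
    simp only [scanCaches, hc]
    rw [if_neg (by omega : ¬ s ≤ (8:Int)),
        if_neg (by omega : ¬ s ≤ (16:Int)),
        if_pos (by omega : s ≤ (32:Int)), if_neg (by norm_num : ¬ (32:Int) ≥ 1024),
        if_neg (by omega : ¬ s > (8192:Int)), if_neg (by omega : ¬ s ≤ (8:Int)),
        if_neg (by omega : ¬ ((64:Int) < s ∧ s ≤ 96)),
        if_neg (by omega : ¬ ((128:Int) < s ∧ s ≤ 192)),
        if_neg (by norm_num : ¬ (32:Int) ≥ 1024)]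
  · -- 32 < s ≤ 64
    have hb : bitLength (s - 1).toNat = 6 := bitLength_eq (k := 5) (by omega) (by omega)
    have hc : ((1 <<< bitLength (s - 1).toNat : Nat) : Int) = 64 := by rw [hb]; decide
    simp only [scanCaches, hc]
    rw [if_neg (by omega : ¬ s ≤ (8:Int)),
        if_neg (by omega : ¬ s ≤ (16:Int)),
        if_neg (by omega : ¬ s ≤ (32:Int)),
        if_pos (by omega : s ≤ (64:Int)), if_neg (by norm_num : ¬ (64:Int) ≥ 1024),
        if_neg (by omega : ¬ s > (8192:Int)), if_neg (by omega : ¬ s ≤ (8:Int)),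
        if_neg (by omega : ¬ ((64:Int) < s ∧ s ≤ 96)),
        if_neg (by omega : ¬ ((128:Int) < s ∧ s ≤ 192)),
        if_neg (by norm_num : ¬ (64:Int) ≥ 1024)]
  · -- 64 < s ≤ 96
    simp only [scanCaches]
    rw [if_neg (by omega : ¬ s ≤ (8:Int)),
        if_neg (by omega : ¬ s ≤ (16:Int)),
        if_neg (by omega : ¬ s ≤ (32:Int)),
        if_neg (by omega : ¬ s ≤ (64:Int)),
        if_pos (by omega : s ≤ (96:Int)), if_neg (by norm_num : ¬ (96:Int) ≥ 1024),
        if_neg (by omega : ¬ s > (8192:Int)), if_neg (by omega : ¬ s ≤ (8:Int)),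
        if_pos (by omega : (64:Int) < s ∧ s ≤ 96),
        if_neg (by norm_num : ¬ (96:Int) ≥ 1024)]
  · -- 96 < s ≤ 128
    have hb : bitLength (s - 1).toNat = 7 := bitLength_eq (k := 6) (by omega) (by omega)
    have hc : ((1 <<< bitLength (s - 1).toNat : Nat) : Int) = 128 := by rw [hb]; decide
    simp only [scanCaches, hc]
    rw [if_neg (by omega : ¬ s ≤ (8:Int)),
        if_neg (by omega : ¬ s ≤ (16:Int)),
        if_neg (by omega : ¬ s ≤ (32:Int)),
        if_neg (by omega : ¬ s ≤ (64:Int)),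
        if_neg (by omega : ¬ s ≤ (96:Int)),
        if_pos (by omega : s ≤ (128:Int)), if_neg (by norm_num : ¬ (128:Int) ≥ 1024),
        if_neg (by omega : ¬ s > (8192:Int)), if_neg (by omega : ¬ s ≤ (8:Int)),
        if_neg (by omega : ¬ ((64:Int) < s ∧ s ≤ 96)),
        if_neg (by omega : ¬ ((128:Int) < s ∧ s ≤ 192)),
        if_neg (by norm_num : ¬ (128:Int) ≥ 1024)]
  · -- 128 < s ≤ 192
    simp only [scanCaches]
    rw [if_neg (by omega : ¬ s ≤ (8:Int)),
        if_neg (by omega : ¬ s ≤ (16:Int)),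
        if_neg (by omega : ¬ s ≤ (32:Int)),
        if_neg (by omega : ¬ s ≤ (64:Int)),
        if_neg (by omega : ¬ s ≤ (96:Int)),
        if_neg (by omega : ¬ s ≤ (128:Int)),
        if_pos (by omega : s ≤ (192:Int)), if_neg (by norm_num : ¬ (192:Int) ≥ 1024),
        if_neg (by omega : ¬ s > (8192:Int)), if_neg (by omega : ¬ s ≤ (8:Int)),
        if_neg (by omega : ¬ ((64:Int) < s ∧ s ≤ 96)), if_pos (by omega : (128:Int) < s ∧ s ≤ 192),
        if_neg (by norm_num : ¬ (192:Int) ≥ 1024)]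
  · -- 192 < s ≤ 256
    have hb : bitLength (s - 1).toNat = 8 := bitLength_eq (k := 7) (by omega) (by omega)
    have hc : ((1 <<< bitLength (s - 1).toNat : Nat) : Int) = 256 := by rw [hb]; decide
    simp only [scanCaches, hc]
    rw [if_neg (by omega : ¬ s ≤ (8:Int)),
        if_neg (by omega : ¬ s ≤ (16:Int)),
        if_neg (by omega : ¬ s ≤ (32:Int)),
        if_neg (by omega : ¬ s ≤ (64:Int)),
        if_neg (by omega : ¬ s ≤ (96:Int)),
        if_neg (by omega : ¬ s ≤ (128:Int)),
        if_neg (by omega : ¬ s ≤ (192:Int)),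
        if_pos (by omega : s ≤ (256:Int)), if_neg (by norm_num : ¬ (256:Int) ≥ 1024),
        if_neg (by omega : ¬ s > (8192:Int)), if_neg (by omega : ¬ s ≤ (8:Int)),
        if_neg (by omega : ¬ ((64:Int) < s ∧ s ≤ 96)),
        if_neg (by omega : ¬ ((128:Int) < s ∧ s ≤ 192)),
        if_neg (by norm_num : ¬ (256:Int) ≥ 1024)]
  · -- 256 < s ≤ 512
    have hb : bitLength (s - 1).toNat = 9 := bitLength_eq (k := 8) (by omega) (by omega)
    have hc : ((1 <<< bitLength (s - 1).toNat : Nat) : Int) = 512 := by rw [hb]; decide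
    simp only [scanCaches, hc]
    rw [if_neg (by omega : ¬ s ≤ (8:Int)),
        if_neg (by omega : ¬ s ≤ (16:Int)),
        if_neg (by omega : ¬ s ≤ (32:Int)),
        if_neg (by omega : ¬ s ≤ (64:Int)),
        if_neg (by omega : ¬ s ≤ (96:Int)),
        if_neg (by omega : ¬ s ≤ (128:Int)),
        if_neg (by omega : ¬ s ≤ (192:Int)),
        if_neg (by omega : ¬ s ≤ (256:Int)),
        if_pos (by omega : s ≤ (512:Int)), if_neg (by norm_num : ¬ (512:Int) ≥ 1024),
        if_neg (by omega : ¬ s > (8192:Int)), if_neg (by omega : ¬ s ≤ (8:Int)),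
        if_neg (by omega : ¬ ((64:Int) < s ∧ s ≤ 96)),
        if_neg (by omega : ¬ ((128:Int) < s ∧ s ≤ 192)),
        if_neg (by norm_num : ¬ (512:Int) ≥ 1024)]
  · -- 512 < s ≤ 1024
    have hb : bitLength (s - 1).toNat = 10 := bitLength_eq (k := 9) (by omega) (by omega)
    have hc : ((1 <<< bitLength (s - 1).toNat : Nat) : Int) = 1024 := by rw [hb]; decide
    simp only [scanCaches, hc]
    rw [if_neg (by omega : ¬ s ≤ (8:Int)),
        if_neg (by omega : ¬ s ≤ (16:Int)),
        if_neg (by omega : ¬ s ≤ (32:Int)),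
        if_neg (by omega : ¬ s ≤ (64:Int)),
        if_neg (by omega : ¬ s ≤ (96:Int)),
        if_neg (by omega : ¬ s ≤ (128:Int)),
        if_neg (by omega : ¬ s ≤ (192:Int)),
        if_neg (by omega : ¬ s ≤ (256:Int)),
        if_neg (by omega : ¬ s ≤ (512:Int)),
        if_pos (by omega : s ≤ (1024:Int)), if_pos (by norm_num : (1024:Int) ≥ 1024),
        if_neg (by omega : ¬ s > (8192:Int)), if_neg (by omega : ¬ s ≤ (8:Int)),
        if_neg (by omega : ¬ ((64:Int) < s ∧ s ≤ 96)),
        if_neg (by omega : ¬ ((128:Int) < s ∧ s ≤ 192)),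
        if_pos (by norm_num : (1024:Int) ≥ 1024)]
  · -- 1024 < s ≤ 2048
    have hb : bitLength (s - 1).toNat = 11 := bitLength_eq (k := 10) (by omega) (by omega)
    have hc : ((1 <<< bitLength (s - 1).toNat : Nat) : Int) = 2048 := by rw [hb]; decide
    simp only [scanCaches, hc]
    rw [if_neg (by omega : ¬ s ≤ (8:Int)),
        if_neg (by omega : ¬ s ≤ (16:Int)),
        if_neg (by omega : ¬ s ≤ (32:Int)),
        if_neg (by omega : ¬ s ≤ (64:Int)),
        if_neg (by omega : ¬ s ≤ (96:Int)),
        if_neg (by omega : ¬ s ≤ (128:Int)),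
        if_neg (by omega : ¬ s ≤ (192:Int)),
        if_neg (by omega : ¬ s ≤ (256:Int)),
        if_neg (by omega : ¬ s ≤ (512:Int)),
        if_neg (by omega : ¬ s ≤ (1024:Int)),
        if_pos (by omega : s ≤ (2048:Int)), if_pos (by norm_num : (2048:Int) ≥ 1024),
        if_neg (by omega : ¬ s > (8192:Int)), if_neg (by omega : ¬ s ≤ (8:Int)),
        if_neg (by omega : ¬ ((64:Int) < s ∧ s ≤ 96)),
        if_neg (by omega : ¬ ((128:Int) < s ∧ s ≤ 192)),
        if_pos (by norm_num : (2048:Int) ≥ 1024)]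
  · -- 2048 < s ≤ 4096
    have hb : bitLength (s - 1).toNat = 12 := bitLength_eq (k := 11) (by omega) (by omega)
    have hc : ((1 <<< bitLength (s - 1).toNat : Nat) : Int) = 4096 := by rw [hb]; decide
    simp only [scanCaches, hc]
    rw [if_neg (by omega : ¬ s ≤ (8:Int)),
        if_neg (by omega : ¬ s ≤ (16:Int)),
        if_neg (by omega : ¬ s ≤ (32:Int)),
        if_neg (by omega : ¬ s ≤ (64:Int)),
        if_neg (by omega : ¬ s ≤ (96:Int)),
        if_neg (by omega : ¬ s ≤ (128:Int)),
        if_neg (by omega : ¬ s ≤ (192:Int)),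
        if_neg (by omega : ¬ s ≤ (256:Int)),
        if_neg (by omega : ¬ s ≤ (512:Int)),
        if_neg (by omega : ¬ s ≤ (1024:Int)),
        if_neg (by omega : ¬ s ≤ (2048:Int)),
        if_pos (by omega : s ≤ (4096:Int)), if_pos (by norm_num : (4096:Int) ≥ 1024),
        if_neg (by omega : ¬ s > (8192:Int)), if_neg (by omega : ¬ s ≤ (8:Int)),
        if_neg (by omega : ¬ ((64:Int) < s ∧ s ≤ 96)),
        if_neg (by omega : ¬ ((128:Int) < s ∧ s ≤ 192)),
        if_pos (by norm_num : (4096:Int) ≥ 1024)]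
  · -- 4096 < s ≤ 8192
    have hb : bitLength (s - 1).toNat = 13 := bitLength_eq (k := 12) (by omega) (by omega)
    have hc : ((1 <<< bitLength (s - 1).toNat : Nat) : Int) = 8192 := by rw [hb]; decide
    simp only [scanCaches, hc]
    rw [if_neg (by omega : ¬ s ≤ (8:Int)),
        if_neg (by omega : ¬ s ≤ (16:Int)),
        if_neg (by omega : ¬ s ≤ (32:Int)),
        if_neg (by omega : ¬ s ≤ (64:Int)),
        if_neg (by omega : ¬ s ≤ (96:Int)),
        if_neg (by omega : ¬ s ≤ (128:Int)),
        if_neg (by omega : ¬ s ≤ (192:Int)),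
        if_neg (by omega : ¬ s ≤ (256:Int)),
        if_neg (by omega : ¬ s ≤ (512:Int)),
        if_neg (by omega : ¬ s ≤ (1024:Int)),
        if_neg (by omega : ¬ s ≤ (2048:Int)),
        if_neg (by omega : ¬ s ≤ (4096:Int)),
        if_pos (by omega : s ≤ (8192:Int)), if_pos (by norm_num : (8192:Int) ≥ 1024),
        if_neg (by omega : ¬ s > (8192:Int)), if_neg (by omega : ¬ s ≤ (8:Int)),
        if_neg (by omega : ¬ ((64:Int) < s ∧ s ≤ 96)),
        if_neg (by omega : ¬ ((128:Int) < s ∧ s ≤ 192)),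
        if_pos (by norm_num : (8192:Int) ≥ 1024)]
  · -- s > 8192
    simp only [scanCaches]
    rw [if_neg (by omega : ¬ s ≤ (8:Int)),
        if_neg (by omega : ¬ s ≤ (16:Int)),
        if_neg (by omega : ¬ s ≤ (32:Int)),
        if_neg (by omega : ¬ s ≤ (64:Int)),
        if_neg (by omega : ¬ s ≤ (96:Int)),
        if_neg (by omega : ¬ s ≤ (128:Int)),
        if_neg (by omega : ¬ s ≤ (192:Int)),
        if_neg (by omega : ¬ s ≤ (256:Int)),
        if_neg (by omega : ¬ s ≤ (512:Int)),
        if_neg (by omega : ¬ s ≤ (1024:Int)),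
        if_neg (by omega : ¬ s ≤ (2048:Int)),
        if_neg (by omega : ¬ s ≤ (4096:Int)),
        if_neg (by omega : ¬ s ≤ (8192:Int)),
        if_pos (by omega : s > (8192:Int))]

-- ===== VERDICT (by name: the statement is the Claim_ definition above) =====
theorem estimate_slab_cache_spec : Claim_equal_estimate_slab_cache := by
  intro obj_name obj_size _
  show estimate_slab_cache obj_name obj_size = estimate_slab_cache_alt obj_name obj_size
  simp only [estimate_slab_cache, estimate_slab_cache_alt]
  by_cases h0 : obj_size = 0
  · subst h0
    rw [if_pos rfl, if_neg (by norm_num : ¬ (0:Int) ≠ 0)]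
    by_cases hd : KNOWN_OBJECT_SIZES.getD obj_name 0 = 0
    · rw [if_pos hd, if_pos hd]
    · rw [if_neg hd, if_neg hd]
      exact core_eq _
  · rw [if_neg h0, if_pos (show obj_size ≠ 0 from h0), if_neg h0, if_neg h0]
    exact core_eq _
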